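-- pv_equiv track=rewrite | github.com/Munyajunior/dental-clinic-management-system | src/services/auth_service.py | _basic_compromised_check
-- ===== SOURCE A (Python) =====
-- def _basic_compromised_check(password: str) -> bool:
--     """Basic compromised password check"""
--     common_passwords = {
--         "password",
--         "123456",
--         "password123",
--         "admin",
--         "qwerty",
--         "letmein",
--         "welcome",
--         "monkey",
--         "dragon",
--         "master",
--         "12345678",
--         "123456789",
--         "1234567890",
--         "abc123",
--         "password1",
--         "123123",
--         "000000",
--         "iloveyou",
--         "sunshine",
--         "princess",
--         "1234",
--         "12345",
--         "1234567",
--         "111111",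
--         "photoshop",
--         "123",
--         "123abc",
--         "aaa",
--         "abc",
--         "access",
--         "adobe",
--         "ashley",
--         "azerty",
--         "bailey",
--         "baseball",
--         "batman",
--         "charlie",
--         "donald",
--         "dragon",
--         "flower",
--         "football",
--         "freedom",
--         "hello",
--         "hottie",
--         "illustrator",
--         "jesus",
--         "letmein",
--         "login",
--         "lovely",
--         "michael",
--         "mustang",
--         "ninja",
--         "passw0rd",
--         "password",
--         "password1",
--         "photoshop",
--         "princess",
--         "qazwsx",
--         "qqww1122",
--         "shadow",
--         "solo",
--         "starwars",
--         "sunshine",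
--         "superman",
--         "trustno1",
--         "welcome",
--         "whatever",
--         "zaq1zaq1",
--     }
--
--     # Also check simple variations
--     simple_variations = (
--         {f"{base}123" for base in common_passwords}
--         | {f"{base}!" for base in common_passwords}
--         | {f"{base}1" for base in common_passwords}
--     )
--
--     all_compromised = common_passwords | simple_variations
--
--     return password.lower() in all_compromised
-- ===== SOURCE B (Python) =====
-- _COMMON = (
--     "password 123456 password123 admin qwerty letmein welcome monkey dragon "
--     "master 12345678 123456789 1234567890 abc123 password1 123123 000000 "
--     "iloveyou sunshine princess 1234 12345 1234567 111111 photoshop 123 "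
--     "123abc aaa abc access adobe ashley azerty bailey baseball batman "
--     "charlie donald flower football freedom hello hottie illustrator jesus "
--     "login lovely michael mustang ninja passw0rd qazwsx qqww1122 shadow "
--     "solo starwars superman trustno1 whatever zaq1zaq1"
-- ).split()
--
--
-- def _basic_compromised_check(password: str) -> bool:
--     """Basic compromised password check"""
--     common = set(_COMMON)
--     pw = password.lower()
--     if pw in common:
--         return True
--     for suffix in ("123", "1", "!"):
--         if pw.endswith(suffix) and pw[: -len(suffix)] in common:
--             return True
--     return False
-- ===== Notes on version B (the rewrite author's own statement) =====
-- stated objective: simpler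
-- what changed: Instead of materialising the union of the base set with three suffixed variants of every base entry (a set four times the size) and testing membership once, B keeps only the base words (stored as one whitespace-split string) and tests the lowercased password directly, otherwise stripping each candidate suffix and testing the remainder, so no variant set is ever built.
import Mathlib
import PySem

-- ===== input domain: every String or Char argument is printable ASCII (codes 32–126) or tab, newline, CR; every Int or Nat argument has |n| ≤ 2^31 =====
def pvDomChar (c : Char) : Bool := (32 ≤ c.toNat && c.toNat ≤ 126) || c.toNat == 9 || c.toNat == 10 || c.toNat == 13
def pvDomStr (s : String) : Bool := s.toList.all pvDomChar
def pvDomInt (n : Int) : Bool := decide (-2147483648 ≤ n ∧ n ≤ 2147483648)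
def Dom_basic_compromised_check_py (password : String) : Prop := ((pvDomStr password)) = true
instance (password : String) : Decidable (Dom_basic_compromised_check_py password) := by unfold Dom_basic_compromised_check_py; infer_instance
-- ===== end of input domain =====

-- B keeps only the base words (one whitespace-split string) and strips candidate suffixes
-- from the password instead of building every base+suffix variant set (objective: simpler).

-- A's set-literal of common passwords, in source order (duplicates as written)
def pvBasesA : List String :=
  ["password", "123456", "password123", "admin", "qwerty", "letmein",
   "welcome", "monkey", "dragon", "master", "12345678", "123456789",
   "1234567890", "abc123", "password1", "123123", "000000", "iloveyou",
   "sunshine", "princess", "1234", "12345", "1234567", "111111",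
   "photoshop", "123", "123abc", "aaa", "abc", "access", "adobe",
   "ashley", "azerty", "bailey", "baseball", "batman", "charlie",
   "donald", "dragon", "flower", "football", "freedom", "hello", "hottie",
   "illustrator", "jesus", "letmein", "login", "lovely", "michael", "mustang",
   "ninja", "passw0rd", "password", "password1", "photoshop", "princess",
   "qazwsx", "qqww1122", "shadow", "solo", "starwars", "sunshine",
   "superman", "trustno1", "welcome", "whatever", "zaq1zaq1"]

-- ===== PORT A =====
def basic_compromised_check_py (password : String) : Bool :=
  let common_passwords : PySem.Set String := PySem.Set.ofList pvBasesA
  let simple_variations : PySem.Set String :=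
    PySem.Set.union
      (PySem.Set.union
        (PySem.Set.ofList (common_passwords.map (fun base => base ++ "123")))
        (common_passwords.map (fun base => base ++ "!")))
      (common_passwords.map (fun base => base ++ "1"))
  let all_compromised : PySem.Set String := PySem.Set.union common_passwords simple_variations
  PySem.Set.contains all_compromised (PySem.Str.lower password)

-- ===== PORT B =====
-- module-level constant _COMMON = "…".split()
def pvCommonWords : List String :=
  PySem.Str.split₀ ("password 123456 password123 admin qwerty letmein welcome monkey dragon master 12345678 123456789 1234567890 abc123 password1 123123 000000 iloveyou sunshine princess 1234 12345 1234567 111111 photoshop 123 123abc aaa abc access adobe ashley azerty bailey baseball batman charlie donald flower football freedom hello hottie illustrator jesus login lovely michael mustang ninja passw0rd qazwsx qqww1122 shadow solo starwars superman trustno1 whatever zaq1zaq1")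

def basic_compromised_check_py_alt (password : String) : Bool :=
  let common : PySem.Set String := PySem.Set.ofList pvCommonWords
  let pw := PySem.Str.lower password
  if PySem.Set.contains common pw then true
  else
    ["123", "1", "!"].any (fun suffix =>
      PySem.Str.endswith pw suffix &&
      PySem.Set.contains common
        (PySem.Str.slice pw none (some (-(PySem.Str.len suffix)))))

-- ===== PRECONDITION & SPEC =====
def Spec_basic_compromised_check_py (password : String) (out : Bool) : Prop := out = basic_compromised_check_py_alt password
instance (password : String) (out : Bool) : Decidable (Spec_basic_compromised_check_py password out) := by unfold Spec_basic_compromised_check_py; infer_instance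

-- ===== CLAIM =====
def Claim_equal_basic_compromised_check_py : Prop := ∀ (password : String), Dom_basic_compromised_check_py password → Spec_basic_compromised_check_py password (basic_compromised_check_py password)

-- ===== LEMMAS AND PROOFS =====

-- B's split word list is exactly the deduplication of A's base list
set_option maxRecDepth 8192 in
set_option maxHeartbeats 2000000 in
theorem pv_words_eq : pvCommonWords = PySem.Set.ofList pvBasesA := by decide

-- s is (some element of L) ++ suf  ↔  s ends with suf and stripping |suf| characters lands in L
theorem pv_mem_map_append_iff (L : List String) (s suf : String) (k : Nat) (hk : 0 < k)
    (hlen : suf.toList.length = k) :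
    s ∈ L.map (fun b => b ++ suf) ↔
      (PySem.Str.endswith s suf = true ∧ PySem.Str.slice s none (some (-(k : Int))) ∈ L) := by
  constructor
  · intro h
    obtain ⟨b, hbL, hb⟩ := List.mem_map.mp h
    subst hb
    constructor
    · rw [PySem.Str.endswith_eq, PySem.Chars.endswith_iff]
      exact ⟨b.toList, by simp⟩
    · have : PySem.Str.slice (b ++ suf) none (some (-(k : Int))) = b := by
        apply String.toList_inj.mp
        rw [PySem.Str.toList_slice, PySem.Chars.slice_eq_listSlice,
          PySem.List.slice_to_neg_natCast _ k hk]
        simp [hlen]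
      rwa [this]
  · rintro ⟨h1, h2⟩
    rw [PySem.Str.endswith_eq, PySem.Chars.endswith_iff] at h1
    obtain ⟨t, ht⟩ := h1
    refine List.mem_map.mpr ⟨_, h2, ?_⟩
    apply String.toList_inj.mp
    rw [String.toList_append, PySem.Str.toList_slice, PySem.Chars.slice_eq_listSlice,
      PySem.List.slice_to_neg_natCast _ k hk, ← ht]
    have hlt : (t ++ suf.toList).length - k = t.length := by simp [hlen]
    rw [hlt, List.take_left]

theorem pv_ports_agree (password : String) :
    basic_compromised_check_py password = basic_compromised_check_py_alt password := by
  unfold basic_compromised_check_py basic_compromised_check_py_alt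
  rw [pv_words_eq]
  show _ = (if PySem.Set.contains (PySem.Set.ofList (PySem.Set.ofList pvBasesA)) _ then _ else _)
  rw [PySem.Set.ofList_ofList]
  generalize PySem.Str.lower password = pw
  have h123 : pw ∈ List.map (fun base => base ++ "123") (PySem.Set.ofList pvBasesA) ↔
      (PySem.Str.endswith pw "123" = true ∧ PySem.Str.slice pw none (some (-3)) ∈ pvBasesA) := by
    have h := pv_mem_map_append_iff (PySem.Set.ofList pvBasesA) pw "123" 3 (by norm_num) (by decide)
    rw [PySem.Set.mem_ofList] at h
    simpa using h
  have h1 : pw ∈ List.map (fun base => base ++ "1") (PySem.Set.ofList pvBasesA) ↔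
      (PySem.Str.endswith pw "1" = true ∧ PySem.Str.slice pw none (some (-1)) ∈ pvBasesA) := by
    have h := pv_mem_map_append_iff (PySem.Set.ofList pvBasesA) pw "1" 1 (by norm_num) (by decide)
    rw [PySem.Set.mem_ofList] at h
    simpa using h
  have hbang : pw ∈ List.map (fun base => base ++ "!") (PySem.Set.ofList pvBasesA) ↔
      (PySem.Str.endswith pw "!" = true ∧ PySem.Str.slice pw none (some (-1)) ∈ pvBasesA) := by
    have h := pv_mem_map_append_iff (PySem.Set.ofList pvBasesA) pw "!" 1 (by norm_num) (by decide)
    rw [PySem.Set.mem_ofList] at h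
    simpa using h
  have hl123 : PySem.Str.len "123" = 3 := by decide
  have hl1 : PySem.Str.len "1" = 1 := by decide
  have hlbang : PySem.Str.len "!" = 1 := by decide
  by_cases hb : pw ∈ PySem.Set.ofList pvBasesA
  · rw [if_pos ((PySem.Set.contains_iff _ _).mpr hb)]
    rw [PySem.Set.contains_iff, PySem.Set.mem_union]
    exact Or.inl hb
  · rw [if_neg (fun h => hb ((PySem.Set.contains_iff _ _).mp h))]
    rw [Bool.eq_iff_iff]
    simp only [PySem.Set.contains_iff, PySem.Set.mem_union, PySem.Set.mem_ofList,
      List.any_cons, List.any_nil, Bool.or_eq_true, Bool.and_eq_true, Bool.or_false,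
      hl123, hl1, hlbang]
    rw [h123, h1, hbang]
    rw [PySem.Set.mem_ofList] at hb
    constructor
    · rintro (h | ((h | h) | h))
      · exact absurd h hb
      · exact Or.inl h
      · exact Or.inr (Or.inr h)
      · exact Or.inr (Or.inl h)
    · rintro (h | (h | h))
      · exact Or.inr (Or.inl (Or.inl h))
      · exact Or.inr (Or.inr h)
      · exact Or.inr (Or.inl (Or.inr h))

-- ===== VERDICT =====
theorem basic_compromised_check_py_spec : Claim_equal_basic_compromised_check_py := by
  intro password _
  exact pv_ports_agree password
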